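-- pv_equiv track=rewrite | github.com/Amarender53/vatins | main.py | generate_group_topic_summary
-- ===== SOURCE A (Python) =====
-- from typing import List, Optional, Dict, Tuple, Any, Callable
--
-- def generate_group_topic_summary(topics: List[str]) -> str:
--     if not topics:
--         return "No clear topics identified for summarization."
--
--     lower_topics = [t.lower() for t in topics]
--
--     narrative = []
--
--     # Section 1: Fraud/Financial
--     if any(k in lower_topics for k in ["sbi", "bank", "otp", "details", "upi"]):
--         narrative.append("Financial terms such as bank names and OTPs were mentioned, indicating possible sharing of sensitive or suspicious information.")
--
--     # Section 2: Casual Chat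
--     if any(k in lower_topics for k in ["hi", "messages", "content", "process", "bro"]):
--         narrative.append("There are casual or conversational terms suggesting regular chatting among group members.")
--
--     # Section 3: Betting/Promotions
--     if any(k in lower_topics for k in ["betting", "promotions", "cheyu"]):
--         narrative.append("Terms related to betting and promotions point to possible gambling-related discussions.")
--
--     # Section 4: Violence/Concern
--     if any(k in lower_topics for k in ["died", "injured", "terrorist", "attack", "morning", "men"]):
--         narrative.append("Mentions of violent or traumatic events raise potential concerns for safety or extremism.")
--
--     # Section 5: Planning
--     if any(k in lower_topics for k in ["22nd", "monna", "gurinchi"]):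
--         narrative.append("Temporal and planning references suggest coordination or discussions around specific events or dates.")
--
--     return " ".join(narrative) if narrative else "No significant narrative could be inferred from the current topics."
-- ===== SOURCE B (Python) =====
-- from typing import List
--
-- # Inverted index: keyword -> section number, built once; plus the per-section messages.
-- _KEYWORD_SECTION = {
--     "sbi": 0, "bank": 0, "otp": 0, "details": 0, "upi": 0,
--     "hi": 1, "messages": 1, "content": 1, "process": 1, "bro": 1,
--     "betting": 2, "promotions": 2, "cheyu": 2,
--     "died": 3, "injured": 3, "terrorist": 3, "attack": 3, "morning": 3, "men": 3,
--     "22nd": 4, "monna": 4, "gurinchi": 4,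
-- }
--
-- _MESSAGES = [
--     "Financial terms such as bank names and OTPs were mentioned, indicating possible sharing of sensitive or suspicious information.",
--     "There are casual or conversational terms suggesting regular chatting among group members.",
--     "Terms related to betting and promotions point to possible gambling-related discussions.",
--     "Mentions of violent or traumatic events raise potential concerns for safety or extremism.",
--     "Temporal and planning references suggest coordination or discussions around specific events or dates.",
-- ]
--
-- def generate_group_topic_summary(topics: List[str]) -> str:
--     if not topics:
--         return "No clear topics identified for summarization."
--     # Single topic-driven pass: look each lowered topic up in the inverted index
--     # and record which sections were hit, instead of scanning the topic list
--     # once per keyword per section.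
--     hits = set()
--     for t in topics:
--         sec = _KEYWORD_SECTION.get(t.lower())
--         if sec is not None:
--             hits.add(sec)
--     narrative = [m for i, m in enumerate(_MESSAGES) if i in hits]
--     return " ".join(narrative) if narrative else "No significant narrative could be inferred from the current topics."
-- ===== Notes on version B (the rewrite author's own statement) =====
-- stated objective: faster
-- what changed: Replaces the five section-driven any()-scans over the topic list with a single topic-driven pass that looks each lowered topic up in an inverted keyword->section dictionary, collecting hit section numbers in a set and then emitting the messages for hit sections in order.
import Mathlib
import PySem

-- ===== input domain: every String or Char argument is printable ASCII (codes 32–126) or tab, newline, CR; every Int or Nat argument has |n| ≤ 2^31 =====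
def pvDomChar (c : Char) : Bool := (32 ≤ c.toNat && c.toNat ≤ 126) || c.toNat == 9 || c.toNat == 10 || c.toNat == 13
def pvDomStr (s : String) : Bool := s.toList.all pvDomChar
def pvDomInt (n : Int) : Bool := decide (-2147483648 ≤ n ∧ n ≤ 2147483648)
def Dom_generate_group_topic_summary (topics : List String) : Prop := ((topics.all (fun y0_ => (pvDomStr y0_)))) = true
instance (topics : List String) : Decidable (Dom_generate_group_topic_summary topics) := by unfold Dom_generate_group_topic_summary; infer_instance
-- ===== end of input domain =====

-- B inverts the traversal: one pass over the topics with a keyword->section dictionary and a set of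
-- hit sections, instead of A's five per-section scans of the topic list; objective: faster (measured).


-- ===== PORT A =====
def generate_group_topic_summary (topics : List String) : String :=
  if topics = [] then "No clear topics identified for summarization."
  else
    let lower_topics := topics.map PySem.Str.lower
    let narrative : List String := []
    let narrative := if (["sbi", "bank", "otp", "details", "upi"] : List String).any (fun k => lower_topics.contains k) then narrative ++ ["Financial terms such as bank names and OTPs were mentioned, indicating possible sharing of sensitive or suspicious information."] else narrative
    let narrative := if (["hi", "messages", "content", "process", "bro"] : List String).any (fun k => lower_topics.contains k) then narrative ++ ["There are casual or conversational terms suggesting regular chatting among group members."] else narrative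
    let narrative := if (["betting", "promotions", "cheyu"] : List String).any (fun k => lower_topics.contains k) then narrative ++ ["Terms related to betting and promotions point to possible gambling-related discussions."] else narrative
    let narrative := if (["died", "injured", "terrorist", "attack", "morning", "men"] : List String).any (fun k => lower_topics.contains k) then narrative ++ ["Mentions of violent or traumatic events raise potential concerns for safety or extremism."] else narrative
    let narrative := if (["22nd", "monna", "gurinchi"] : List String).any (fun k => lower_topics.contains k) then narrative ++ ["Temporal and planning references suggest coordination or discussions around specific events or dates."] else narrative
    if narrative ≠ [] then PySem.Str.join " " narrative
    else "No significant narrative could be inferred from the current topics."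

-- ===== PORT B =====
-- inverted index: keyword -> section number (Source B's _KEYWORD_SECTION)
def pvKeywordSection : PySem.Dict String Int := PySem.Dict.mk
  [ ("sbi", 0), ("bank", 0), ("otp", 0), ("details", 0), ("upi", 0),
    ("hi", 1), ("messages", 1), ("content", 1), ("process", 1), ("bro", 1),
    ("betting", 2), ("promotions", 2), ("cheyu", 2),
    ("died", 3), ("injured", 3), ("terrorist", 3), ("attack", 3), ("morning", 3), ("men", 3),
    ("22nd", 4), ("monna", 4), ("gurinchi", 4) ]

-- per-section messages (Source B's _MESSAGES)
def pvMessages : List String :=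
  [ "Financial terms such as bank names and OTPs were mentioned, indicating possible sharing of sensitive or suspicious information.",
    "There are casual or conversational terms suggesting regular chatting among group members.",
    "Terms related to betting and promotions point to possible gambling-related discussions.",
    "Mentions of violent or traumatic events raise potential concerns for safety or extremism.",
    "Temporal and planning references suggest coordination or discussions around specific events or dates." ]

def generate_group_topic_summary_alt (topics : List String) : String :=
  if topics = [] then "No clear topics identified for summarization."
  else
    let hits : PySem.Set Int := topics.foldl (fun hits t =>
      match PySem.Dict.get? pvKeywordSection (PySem.Str.lower t) with
      | some sec => PySem.Set.add hits sec
      | none => hits) PySem.Set.empty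
    let narrative := ((PySem.List.enumerate pvMessages).filter
      (fun p => PySem.Set.contains hits p.1)).map Prod.snd
    if narrative ≠ [] then PySem.Str.join " " narrative
    else "No significant narrative could be inferred from the current topics."

-- ===== PRECONDITION & SPEC =====
def Spec_generate_group_topic_summary (topics : List String) (out : String) : Prop := out = generate_group_topic_summary_alt topics
instance (topics : List String) (out : String) : Decidable (Spec_generate_group_topic_summary topics out) := by unfold Spec_generate_group_topic_summary; infer_instance

-- ===== CLAIM =====
def Claim_equal_generate_group_topic_summary : Prop := ∀ (topics : List String), Dom_generate_group_topic_summary topics → Spec_generate_group_topic_summary topics (generate_group_topic_summary topics)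

-- ===== LEMMAS AND PROOFS =====
def pvAllKeys : List String :=
  ["sbi","bank","otp","details","upi","hi","messages","content","process","bro",
   "betting","promotions","cheyu","died","injured","terrorist","attack","morning","men",
   "22nd","monna","gurinchi"]

theorem pv_contains_add (s : PySem.Set Int) (x y : Int) :
    PySem.Set.contains (PySem.Set.add s x) y = (PySem.Set.contains s y || x == y) := by
  rw [Bool.eq_iff_iff]
  simp only [PySem.Set.contains_iff, PySem.Set.mem_add, Bool.or_eq_true, beq_iff_eq]
  tauto

theorem pv_key_none (s : String) (h : s ∉ pvAllKeys) :
    PySem.Dict.get? pvKeywordSection s = none := by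
  rw [PySem.Dict.get?_eq_none_iff_not_mem_keys]
  simpa [pvKeywordSection, pvAllKeys] using h

theorem pv_contains_false (s : String) (kws : List String)
    (hsub : ∀ x ∈ kws, x ∈ pvAllKeys) (h : s ∉ pvAllKeys) :
    kws.contains s = false := by
  cases hco : kws.contains s
  · rfl
  · exact absurd (hsub s (List.contains_iff_mem.mp hco)) h

-- the inverted index sends s to section i exactly when s is one of section i's keywords
theorem pv_key_all (s : String) :
    ((PySem.Dict.get? pvKeywordSection s == some (0:Int)) = (["sbi","bank","otp","details","upi"] : List String).contains s)
  ∧ ((PySem.Dict.get? pvKeywordSection s == some (1:Int)) = (["hi","messages","content","process","bro"] : List String).contains s)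
  ∧ ((PySem.Dict.get? pvKeywordSection s == some (2:Int)) = (["betting","promotions","cheyu"] : List String).contains s)
  ∧ ((PySem.Dict.get? pvKeywordSection s == some (3:Int)) = (["died","injured","terrorist","attack","morning","men"] : List String).contains s)
  ∧ ((PySem.Dict.get? pvKeywordSection s == some (4:Int)) = (["22nd","monna","gurinchi"] : List String).contains s) := by
  by_cases h : s ∈ pvAllKeys
  · fin_cases h <;> decide
  · rw [pv_key_none s h,
        pv_contains_false s _ (by decide) h, pv_contains_false s _ (by decide) h,
        pv_contains_false s _ (by decide) h, pv_contains_false s _ (by decide) h,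
        pv_contains_false s _ (by decide) h]
    exact ⟨rfl, rfl, rfl, rfl, rfl⟩

theorem pv_hits_contains (topics : List String) (acc : PySem.Set Int) (i : Int) :
    PySem.Set.contains (topics.foldl (fun hits t =>
      match PySem.Dict.get? pvKeywordSection (PySem.Str.lower t) with
      | some sec => PySem.Set.add hits sec
      | none => hits) acc) i
    = (PySem.Set.contains acc i
       || topics.any (fun t => PySem.Dict.get? pvKeywordSection (PySem.Str.lower t) == some i)) := by
  induction topics generalizing acc with
  | nil => simp
  | cons t ts ih =>
    cases h : PySem.Dict.get? pvKeywordSection (PySem.Str.lower t) with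
    | none =>
      simp only [List.foldl_cons, List.any_cons, h]
      rw [ih]
      simp
    | some sec =>
      simp only [List.foldl_cons, List.any_cons, h]
      rw [ih, pv_contains_add]
      cases hs : (sec == i) <;>
        cases hts : ts.any (fun t => PySem.Dict.get? pvKeywordSection (PySem.Str.lower t) == some i) <;>
        simp_all

theorem pv_any_swap (l1 l2 : List String) :
    l1.any (fun k => l2.contains k) = l2.any (fun s => l1.contains s) := by
  rw [Bool.eq_iff_iff]
  simp only [List.any_eq_true, List.contains_iff_mem]
  exact ⟨fun ⟨x, h1, h2⟩ => ⟨x, h2, h1⟩, fun ⟨x, h1, h2⟩ => ⟨x, h2, h1⟩⟩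

theorem pv_sec (topics : List String) (i : Int) (kws : List String)
    (hpt : ∀ s : String, (PySem.Dict.get? pvKeywordSection s == some i) = kws.contains s) :
    topics.any (fun t => PySem.Dict.get? pvKeywordSection (PySem.Str.lower t) == some i)
    = kws.any (fun k => (topics.map PySem.Str.lower).contains k) := by
  rw [pv_any_swap kws (topics.map PySem.Str.lower), List.any_map]
  congr 1
  funext t
  exact hpt (PySem.Str.lower t)

-- ===== VERDICT =====
theorem generate_group_topic_summary_spec : Claim_equal_generate_group_topic_summary := by
  intro topics _
  unfold Spec_generate_group_topic_summary
  by_cases h : topics = []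
  · simp [generate_group_topic_summary, generate_group_topic_summary_alt, h]
  · simp only [generate_group_topic_summary, generate_group_topic_summary_alt, if_neg h,
      pvMessages, PySem.List.enumerate, List.filter_cons, List.filter_nil]
    rw [show PySem.Set.contains = fun (s : PySem.Set Int) (x : Int) => s.contains x from rfl]
    simp only [pv_hits_contains]
    simp only [show ∀ i : Int, PySem.Set.contains PySem.Set.empty i = false from fun _ => rfl,
      Bool.false_or, Int.reduceAdd]
    rw [pv_sec topics 0 _ (fun s => (pv_key_all s).1),
      pv_sec topics 1 _ (fun s => (pv_key_all s).2.1),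
      pv_sec topics 2 _ (fun s => (pv_key_all s).2.2.1),
      pv_sec topics 3 _ (fun s => (pv_key_all s).2.2.2.1),
      pv_sec topics 4 _ (fun s => (pv_key_all s).2.2.2.2)]
    generalize (["sbi", "bank", "otp", "details", "upi"] : List String).any
      (fun k => (topics.map PySem.Str.lower).contains k) = c1
    generalize (["hi", "messages", "content", "process", "bro"] : List String).any
      (fun k => (topics.map PySem.Str.lower).contains k) = c2
    generalize (["betting", "promotions", "cheyu"] : List String).any
      (fun k => (topics.map PySem.Str.lower).contains k) = c3
    generalize (["died", "injured", "terrorist", "attack", "morning", "men"] : List String).any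
      (fun k => (topics.map PySem.Str.lower).contains k) = c4
    generalize (["22nd", "monna", "gurinchi"] : List String).any
      (fun k => (topics.map PySem.Str.lower).contains k) = c5
    cases c1 <;> cases c2 <;> cases c3 <;> cases c4 <;> cases c5 <;> rfl
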